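-- pv_equiv track=rewrite | github.com/topekkrol/Przejazdy | wyszukiwarka_makaronowa.py | sortowanie
-- ===== SOURCE A (Python) =====
-- def sortowanie(sortowanie_lista):
--     lista8=[]
--     try:
--         y = 999
--         for trasy in sortowanie_lista:
--             if y > trasy['km']:
--                 y = trasy['km']
--
--         for trasy in sortowanie_lista:
--             if trasy['km'] == y:
--                 lista8.append(trasy)
--
--         return (lista8)
--     except:
--         return None
-- ===== SOURCE B (Python) =====
-- def sortowanie(sortowanie_lista):
--     try:
--         best = 999
--         result = []
--         for trasy in sortowanie_lista:
--             km = trasy['km']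
--             if km < best:
--                 best = km
--                 result = [trasy]
--             elif km == best:
--                 result.append(trasy)
--         return result
--     except:
--         return None
-- ===== Notes on version B (the rewrite author's own statement) =====
-- stated objective: alternative
-- what changed: Replaced A's two passes (min scan, then filter scan) with a single pass that keeps the running minimum and resets/extends the result list as it goes.
import Mathlib
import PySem

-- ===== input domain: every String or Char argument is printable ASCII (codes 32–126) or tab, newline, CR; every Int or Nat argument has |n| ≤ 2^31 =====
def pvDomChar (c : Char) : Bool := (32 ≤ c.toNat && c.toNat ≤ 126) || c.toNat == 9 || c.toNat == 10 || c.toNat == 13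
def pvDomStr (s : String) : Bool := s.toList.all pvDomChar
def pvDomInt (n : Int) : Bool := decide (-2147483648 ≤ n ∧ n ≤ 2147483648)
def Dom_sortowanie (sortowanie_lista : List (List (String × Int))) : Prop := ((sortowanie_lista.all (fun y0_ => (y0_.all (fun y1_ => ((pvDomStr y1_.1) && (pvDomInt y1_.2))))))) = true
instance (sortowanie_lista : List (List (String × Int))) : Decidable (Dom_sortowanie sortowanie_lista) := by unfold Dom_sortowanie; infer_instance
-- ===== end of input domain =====

-- B replaces A's two passes (min scan, then filter scan) by ONE pass that keeps the
-- running minimum and resets/extends the result list; same values everywhere (incl. the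
-- 999 cap and None on a missing 'km' key).

-- ===== PORT A =====
-- dict lookup trasy['km'] is first-match lookup in the association list; none = KeyError,
-- which A's bare 'except' turns into None — hence the Option-valued folds.
def sortowanie (sortowanie_lista : List (List (String × Int))) : Option (List (List (String × Int))) :=
  match (sortowanie_lista.foldlM (fun (y : Int) trasy =>
      (List.lookup "km" trasy).map (fun km => if y > km then km else y)) (999 : Int)) with
  | none => none
  | some y =>
    match (sortowanie_lista.foldlM
        (fun (lista8 : List (List (String × Int))) trasy =>
          (List.lookup "km" trasy).map (fun km =>
            if km == y then lista8 ++ [trasy] else lista8))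
        ([] : List (List (String × Int)))) with
    | none => none
    | some lista8 => some lista8

-- ===== PORT B =====
def sortowanie_alt (sortowanie_lista : List (List (String × Int))) : Option (List (List (String × Int))) :=
  (sortowanie_lista.foldlM
      (fun (s : Int × List (List (String × Int))) trasy =>
        (List.lookup "km" trasy).map (fun km =>
          if km < s.1 then (km, [trasy])
          else if km == s.1 then (s.1, s.2 ++ [trasy])
          else s))
      ((999 : Int), ([] : List (List (String × Int))))).map (·.2)

-- ===== PRECONDITION & SPEC =====
def Spec_sortowanie (sortowanie_lista : List (List (String × Int))) (out : Option (List (List (String × Int)))) : Prop := out = sortowanie_alt sortowanie_lista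
instance (sortowanie_lista : List (List (String × Int))) (out : Option (List (List (String × Int)))) : Decidable (Spec_sortowanie sortowanie_lista out) := by unfold Spec_sortowanie; infer_instance

-- ===== CLAIM (what is proved, stated in full; the proofs are below) =====
def Claim_equal_sortowanie : Prop := ∀ (sortowanie_lista : List (List (String × Int))), Dom_sortowanie sortowanie_lista → Spec_sortowanie sortowanie_lista (sortowanie sortowanie_lista)

-- ===== LEMMAS AND PROOFS =====

-- abbreviations for the three loops (proof-side only; the ports stay inline)
def pvKm (t : List (String × Int)) : Option Int := List.lookup "km" t

def pvMinO (L : List (List (String × Int))) (b : Int) : Option Int :=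
  L.foldlM (fun (y : Int) trasy =>
    (List.lookup "km" trasy).map (fun km => if y > km then km else y)) b

def pvFiltO (L : List (List (String × Int))) (y : Int)
    (acc : List (List (String × Int))) : Option (List (List (String × Int))) :=
  L.foldlM (fun lista8 trasy =>
    (List.lookup "km" trasy).map (fun km =>
      if km == y then lista8 ++ [trasy] else lista8)) acc

def pvB (L : List (List (String × Int))) (s : Int × List (List (String × Int))) :
    Option (Int × List (List (String × Int))) :=
  L.foldlM (fun s trasy =>
    (List.lookup "km" trasy).map (fun km =>
      if km < s.1 then (km, [trasy])
      else if km == s.1 then (s.1, s.2 ++ [trasy])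
      else s)) s

def pvPf (L : List (List (String × Int))) (y : Int) : List (List (String × Int)) :=
  L.filter (fun t => pvKm t == some y)

lemma pvMinO_le : ∀ (L : List (List (String × Int))) (b m : Int),
    pvMinO L b = some m → m ≤ b := by
  intro L
  induction L with
  | nil => intro b m h; simp [pvMinO] at h; omega
  | cons t L ih =>
    intro b m h
    simp only [pvMinO, List.foldlM_cons] at h
    cases hk : List.lookup "km" t with
    | none => simp [hk] at h
    | some km =>
      simp only [hk, Option.map_some, Option.bind_eq_bind, Option.bind_some] at h
      have := ih _ _ h
      split at this <;> omega

lemma pvMinO_all_some : ∀ (L : List (List (String × Int))) (b m : Int),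
    pvMinO L b = some m → ∀ t ∈ L, (pvKm t).isSome := by
  intro L
  induction L with
  | nil => intro b m _ t ht; simp at ht
  | cons u L ih =>
    intro b m h t ht
    simp only [pvMinO, List.foldlM_cons] at h
    cases hk : List.lookup "km" u with
    | none => simp [hk] at h
    | some km =>
      simp only [hk, Option.map_some, Option.bind_eq_bind, Option.bind_some] at h
      rcases List.mem_cons.mp ht with rfl | ht'
      · simp [pvKm, hk]
      · exact ih _ _ h t ht'

lemma pvFiltO_eq : ∀ (L : List (List (String × Int))) (y : Int)
    (acc : List (List (String × Int))),
    (∀ t ∈ L, (pvKm t).isSome) → pvFiltO L y acc = some (acc ++ pvPf L y) := by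
  intro L
  induction L with
  | nil => intro y acc _; simp [pvFiltO, pvPf]
  | cons t L ih =>
    intro y acc hall
    have ht : (pvKm t).isSome := hall t (by simp)
    rcases Option.isSome_iff_exists.mp ht with ⟨km, hk⟩
    have hk' : List.lookup "km" t = some km := hk
    simp only [pvFiltO, List.foldlM_cons, hk', Option.map_some, Option.bind_eq_bind, Option.bind_some]
    have htail : ∀ u ∈ L, (pvKm u).isSome := fun u hu => hall u (by simp [hu])
    have := ih y (if km == y then acc ++ [t] else acc) htail
    simp only [pvFiltO] at this
    rw [this]
    by_cases h : km = y
    · simp [pvPf, pvKm, hk', h]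
    · simp [pvPf, pvKm, hk', h]

lemma pvB_eq : ∀ (L : List (List (String × Int))) (b : Int)
    (r : List (List (String × Int))),
    pvB L (b, r) = (pvMinO L b).map (fun m =>
      (m, if m = b then r ++ pvPf L b else pvPf L m)) := by
  intro L
  induction L with
  | nil => intro b r; simp [pvB, pvMinO, pvPf]
  | cons t L ih =>
    intro b r
    cases hk : List.lookup "km" t with
    | none => simp [pvB, pvMinO, List.foldlM_cons, hk]
    | some km =>
      simp only [pvB, pvMinO, List.foldlM_cons, hk, Option.map_some,
        Option.bind_eq_bind, Option.bind_some]
      by_cases h1 : km < b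
      · -- reset: km < b
        simp only [if_pos h1]
        have hih := ih km [t]
        simp only [pvB, pvMinO] at hih
        rw [hih]
        cases hm : (L.foldlM (fun (y : Int) trasy =>
            (List.lookup "km" trasy).map (fun km => if y > km then km else y)) km) with
        | none => simp
        | some m =>
          have hle : m ≤ km := pvMinO_le L km m hm
          have hmb : ¬ m = b := by omega
          simp only [Option.map_some, Option.some.injEq]
          congr 1
          rw [if_neg hmb]
          by_cases h2 : m = km
          · subst h2
            simp [pvPf, pvKm, hk]
          · have hkm : ¬ km = m := fun h => h2 h.symm
            rw [if_neg h2]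
            simp [pvPf, pvKm, hk, hkm]
      · simp only [if_neg h1]
        by_cases h2 : km = b
        · -- append: km == b
          simp only [if_pos (show (km == b) = true from by simp [h2])]
          have hih := ih b (r ++ [t])
          simp only [pvB, pvMinO] at hih
          rw [hih]
          cases hm : (L.foldlM (fun (y : Int) trasy =>
              (List.lookup "km" trasy).map (fun km => if y > km then km else y)) b) with
          | none => simp
          | some m =>
            have hle : m ≤ b := pvMinO_le L b m hm
            simp only [Option.map_some, Option.some.injEq]
            congr 1
            by_cases h3 : m = b
            · rw [if_pos h3, if_pos h3]
              subst h3
              simp [pvPf, pvKm, hk, h2, List.append_assoc]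
            · have hkm : ¬ km = m := by omega
              rw [if_neg h3, if_neg h3]
              simp [pvPf, pvKm, hk, hkm]
        · -- skip: km > b
          simp only [if_neg (show ¬ (km == b) = true from by simp [h2])]
          have hih := ih b r
          simp only [pvB, pvMinO] at hih
          rw [hih]
          cases hm : (L.foldlM (fun (y : Int) trasy =>
              (List.lookup "km" trasy).map (fun km => if y > km then km else y)) b) with
          | none => simp
          | some m =>
            have hle : m ≤ b := pvMinO_le L b m hm
            have hkm : ¬ km = m := by omega
            simp only [Option.map_some, Option.some.injEq]
            congr 1
            split <;> simp [pvPf, pvKm, hk, h2, hkm]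

-- ===== VERDICT (by name: the statement is the Claim_ definition above) =====
theorem sortowanie_spec : Claim_equal_sortowanie := by
  intro L _
  show sortowanie L = sortowanie_alt L
  have hB : sortowanie_alt L = (pvB L (999, [])).map (·.2) := rfl
  rw [hB, pvB_eq L 999 []]
  show (match pvMinO L 999 with
    | none => none
    | some y =>
      match pvFiltO L y [] with
      | none => none
      | some lista8 => some lista8) = _
  cases hm : pvMinO L 999 with
  | none => simp
  | some m =>
    have hall := pvMinO_all_some L 999 m hm
    simp only [pvFiltO_eq L m [] hall, Option.map_some, List.nil_append]
    by_cases h : m = 999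
    · subst h; simp
    · simp [h]
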